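-- pv_equiv track=rewrite | github.com/DOMI-CONUS/conodictor | conodictor/conodictor.py | clear_dict
-- ===== SOURCE A (Python) =====
-- from collections import Counter, defaultdict
--
-- def clear_dict(hdict, hmm):
--     """
--     clear_dict filter out sequences without a MATURE HMM or PSSM profile
--     matched by hmmsearch or pfscan. It return the input dict with sequences
--     without MATURE profile match filtered out.
--
--     :hdict: A dictionnary containing matching profiles names by family by
--             sequence id.
--
--     example: {'sp|P0C640|CT55_CONPL':
--               defaultdict(<class 'list'>, {'A': ['MAT', 'SIG']}),
--               'sp|Q1A3Q6|CT57_CONLT':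
--                defaultdict(<class 'list'>, {'T': ['MAT', 'PRO', 'SIG']})}
--
--     Such dict is created with defaultdict(lambda: defaultdict(list))
--     """
--     remove = defaultdict(list)
--
--     # Get list of seq without mature sequence match
--     for k, v in hdict.items():
--         for a, b in v.items():
--             if hmm:
--                 s = [j.split("#")[2] for j in b]
--                 if "MAT" not in s:
--                     remove[k].append(a)
--             else:
--                 if "MAT" not in b:
--                     remove[k].append(a)
--
--     # Remove families without mature sequence match
--     for k, v in remove.items():
--         for x in v:
--             del hdict[k][x]
--
--     # Remove sequence with no match with mature sequence
--     for k in remove.keys():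
--         if not hdict[k]:
--             del hdict[k]
--
--     return hdict
-- ===== SOURCE B (Python) =====
-- def clear_dict(hdict, hmm):
--     """Rebuild the dict in one pass, keeping only entries with a MATURE
--     profile match and only families that still have entries.
--     (Returns a new dict; equivalence with the original is about the
--     return value only -- the original mutates hdict in place.)"""
--     def has_mat(b):
--         tags = [j.split("#")[2] for j in b] if hmm else b
--         return "MAT" in tags
--     result = {}
--     for k, v in hdict.items():
--         kept = {a: b for a, b in v.items() if has_mat(b)}
--         if kept:
--             result[k] = kept
--     return result
-- ===== Notes on version B (the rewrite author's own statement) =====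
-- stated objective: simpler
-- what changed: A builds a separate 'remove' index dict in one double loop and then runs two more deletion passes over it (mutating hdict in place); B is a single filtering rebuild returning a new dict. …
-- outside the precondition, e.g. on clear_dict({'k': {}}, False): A returns {'k': {}}, B returns {}
import Mathlib
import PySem

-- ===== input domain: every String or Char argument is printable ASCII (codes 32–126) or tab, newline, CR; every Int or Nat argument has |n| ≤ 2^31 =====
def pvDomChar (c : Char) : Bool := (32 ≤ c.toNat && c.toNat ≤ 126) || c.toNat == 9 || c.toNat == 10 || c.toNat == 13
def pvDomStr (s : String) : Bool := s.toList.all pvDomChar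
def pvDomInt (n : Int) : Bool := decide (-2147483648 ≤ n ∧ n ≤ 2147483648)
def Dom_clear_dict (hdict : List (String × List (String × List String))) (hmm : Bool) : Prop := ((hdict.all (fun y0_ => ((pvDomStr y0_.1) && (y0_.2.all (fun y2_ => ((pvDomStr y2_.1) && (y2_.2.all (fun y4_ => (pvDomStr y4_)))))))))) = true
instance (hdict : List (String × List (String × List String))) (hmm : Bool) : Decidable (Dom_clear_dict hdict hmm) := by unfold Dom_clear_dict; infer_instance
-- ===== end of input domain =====

-- B replaces A's three passes (collect a `remove` index, delete its entries, delete emptied keys)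
-- by one filtering rebuild; equivalence is about the RETURN value only (A mutates hdict in place, B builds a new dict).

-- ===== PORT A =====
-- j.split("#")[2]; Pre_ guarantees index 2 is in range (Python raises IndexError otherwise)
def pvThirdA (j : String) : String := (PySem.List.pyGet? (((PySem.Str.split? j "#").getD [])) 2).getD ""

-- the test inside A's first loop: hmm → '"MAT" not in [j.split("#")[2] for j in b]', else '"MAT" not in b'
def pvFail (hmm : Bool) (b : List String) : Bool :=
  if hmm then !((b.map pvThirdA).contains "MAT") else !(b.contains "MAT")

-- dict assignment d[k] = w: overwrite in place, new keys append (dict → assoc list convention)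
def pvDictSet (l : List (String × List String)) (k : String) (w : List String) : List (String × List String) :=
  match l with
  | [] => [(k, w)]
  | (k', w') :: t => if k' = k then (k, w) :: t else (k', w') :: pvDictSet t k w

-- del d[x]: remove the (unique) entry with key x; KeyError (key absent) never happens where A runs it
def pvDictDel {α : Type} (l : List (String × α)) (x : String) : List (String × α) :=
  match l with
  | [] => []
  | (k', w') :: t => if k' = x then t else (k', w') :: pvDictDel t x

-- mutation of the inner dict object hdict[k] (del hdict[k][x] rewrites the value stored at k)
def pvDictModify (l : List (String × List (String × List String))) (k : String)
    (f : List (String × List String) → List (String × List String)) : List (String × List (String × List String)) :=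
  match l with
  | [] => []
  | (k', w') :: t => if k' = k then (k, f w') :: t else (k', w') :: pvDictModify t k f

-- first loop pair body: remove[k].append(a) when the test fails (defaultdict(list))
def pvStep1 (hmm : Bool) (k : String) (rem : List (String × List String)) (ab : String × List String) : List (String × List String) :=
  if pvFail hmm ab.2 then pvDictSet rem k (((List.lookup k rem).getD []) ++ [ab.1]) else rem

-- A's first double loop, building `remove`
def pvBuildRemove (hmm : Bool) (hdict : List (String × List (String × List String))) : List (String × List String) :=
  hdict.foldl (fun rem kv => kv.2.foldl (pvStep1 hmm kv.1) rem) []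

-- A's second double loop: for k, v in remove.items(): for x in v: del hdict[k][x]
def pvPhase2 (remove : List (String × List String)) (h : List (String × List (String × List String))) : List (String × List (String × List String)) :=
  remove.foldl (fun h kx => kx.2.foldl (fun h x => pvDictModify h kx.1 (fun inner => pvDictDel inner x)) h) h

-- A's third loop: for k in remove.keys(): if not hdict[k]: del hdict[k]
def pvPhase3 (remove : List (String × List String)) (h : List (String × List (String × List String))) : List (String × List (String × List String)) :=
  remove.foldl (fun h kx => if List.lookup kx.1 h = some [] then pvDictDel h kx.1 else h) h

def clear_dict (hdict : List (String × List (String × List String))) (hmm : Bool) : List (String × List (String × List String)) :=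
  pvPhase3 (pvBuildRemove hmm hdict) (pvPhase2 (pvBuildRemove hmm hdict) hdict)

-- ===== PORT B =====
-- has_mat(b): 'MAT' in ([j.split('#')[2] for j in b] if hmm else b)
def pvHasMat (hmm : Bool) (b : List String) : Bool :=
  if hmm then (b.map pvThirdA).contains "MAT" else b.contains "MAT"

-- for k, v: kept = {a: b for a, b in v if has_mat(b)}; if kept: result[k] = kept
def clear_dict_alt (hdict : List (String × List (String × List String))) (hmm : Bool) : List (String × List (String × List String)) :=
  hdict.filterMap (fun kv =>
    let kept := kv.2.filter (fun ab => pvHasMat hmm ab.2)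
    if kept.isEmpty then none else some (kv.1, kept))

-- ===== PRECONDITION & SPEC =====
-- The first two conjuncts are the dict-representation invariant (a Python dict cannot carry duplicate
-- keys, so they exclude no Python input); the third excludes exactly the inputs where A raises
-- IndexError on j.split("#")[2] (hmm=True and some matched profile name has fewer than two '#');
-- the fourth excludes inputs carrying an EMPTY inner dict — impossible under the defaultdict
-- construction the docstring describes, and a corner where A's value (keep the empty family,
-- since only keys entered in 'remove' are ever deleted) and B's (drop it, as it has no MATURE
-- match) are both defensible.
def Pre_clear_dict (hdict : List (String × List (String × List String))) (hmm : Bool) : Prop :=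
  (hdict.map Prod.fst).Nodup ∧
  (∀ kv ∈ hdict, (kv.2.map Prod.fst).Nodup) ∧
  (hmm = true → ∀ kv ∈ hdict, ∀ ab ∈ kv.2, ∀ j ∈ ab.2, 3 ≤ (((PySem.Str.split? j "#").getD [])).length) ∧
  (∀ kv ∈ hdict, kv.2 ≠ [])
instance (hdict : List (String × List (String × List String))) (hmm : Bool) : Decidable (Pre_clear_dict hdict hmm) := by unfold Pre_clear_dict; infer_instance

def pvWitness_clear_dict : (List (String × List (String × List String))) × Bool :=
  ([("sp|P1|A", [("A", ["x#y#MAT", "x#y#SIG"]), ("B", ["p#q#SIG"])]), ("sp|P2|B", [("C", ["p#q#PRO"])])], true)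

def Spec_clear_dict (hdict : List (String × List (String × List String))) (hmm : Bool) (out : List (String × List (String × List String))) : Prop := out = clear_dict_alt hdict hmm
instance (hdict : List (String × List (String × List String))) (hmm : Bool) (out : List (String × List (String × List String))) : Decidable (Spec_clear_dict hdict hmm out) := by unfold Spec_clear_dict; infer_instance

-- ===== CLAIM (what is proved, stated in full; the proofs are below) =====
def Claim_equal_clear_dict : Prop := ∀ (hdict : List (String × List (String × List String))) (hmm : Bool), Dom_clear_dict hdict hmm → Pre_clear_dict hdict hmm → Spec_clear_dict hdict hmm (clear_dict hdict hmm)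

-- ===== LEMMAS AND PROOFS =====

theorem pvHasMat_eq_not_fail (hmm : Bool) (b : List String) : pvHasMat hmm b = ! pvFail hmm b := by
  cases hmm <;> simp [pvHasMat, pvFail]

-- keys removed from one inner dict, in A's collection order
def pvRmv (hmm : Bool) (v : List (String × List String)) : List String :=
  (v.filter (fun ab => pvFail hmm ab.2)).map Prod.fst

-- the value A's `remove` dict holds
def pvR (hmm : Bool) (hd : List (String × List (String × List String))) : List (String × List String) :=
  hd.filterMap (fun kv => if pvRmv hmm kv.2 = [] then none else some (kv.1, pvRmv hmm kv.2))

theorem lookup_not_mem {α : Type} (rem : List (String × α)) (k : String)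
    (h : k ∉ rem.map Prod.fst) : List.lookup k rem = none := by
  induction rem with
  | nil => rfl
  | cons p t ih =>
    obtain ⟨a, b⟩ := p
    simp only [List.map_cons, List.mem_cons, not_or] at h
    have hb : (k == a) = false := by simpa using h.1
    simp [List.lookup, hb, ih h.2]

theorem lookup_append_self (rem : List (String × List String)) (k : String) (l : List String)
    (h : k ∉ rem.map Prod.fst) : List.lookup k (rem ++ [(k, l)]) = some l := by
  induction rem with
  | nil => simp [List.lookup]
  | cons p t ih =>
    obtain ⟨a, b⟩ := p
    simp only [List.map_cons, List.mem_cons, not_or] at h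
    have hb : (k == a) = false := by simpa using h.1
    simp [List.lookup, hb, ih h.2]

theorem dictSet_not_mem (rem : List (String × List String)) (k : String) (w : List String)
    (h : k ∉ rem.map Prod.fst) : pvDictSet rem k w = rem ++ [(k, w)] := by
  induction rem with
  | nil => rfl
  | cons p t ih =>
    obtain ⟨a, b⟩ := p
    simp only [List.map_cons, List.mem_cons, not_or] at h
    simp [pvDictSet, Ne.symm h.1, ih h.2]

theorem dictSet_append (rem : List (String × List String)) (k : String) (l w : List String)
    (h : k ∉ rem.map Prod.fst) : pvDictSet (rem ++ [(k, l)]) k w = rem ++ [(k, w)] := by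
  induction rem with
  | nil => simp [pvDictSet]
  | cons p t ih =>
    obtain ⟨a, b⟩ := p
    simp only [List.map_cons, List.mem_cons, not_or] at h
    simp [pvDictSet, Ne.symm h.1, ih h.2]

theorem inner_aux (hmm : Bool) (k : String) (v : List (String × List String))
    (rem : List (String × List String)) (l : List String) (h : k ∉ rem.map Prod.fst) :
    v.foldl (pvStep1 hmm k) (rem ++ [(k, l)]) = rem ++ [(k, l ++ pvRmv hmm v)] := by
  induction v generalizing l with
  | nil => simp [pvRmv]
  | cons ab t ih =>
    simp only [List.foldl_cons, pvStep1]
    by_cases hf : pvFail hmm ab.2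
    · rw [if_pos hf, lookup_append_self rem k l h, Option.getD_some,
        dictSet_append rem k l (l ++ [ab.1]) h, ih (l ++ [ab.1])]
      simp [pvRmv, List.filter_cons, hf]
    · rw [if_neg hf, ih l]
      simp [pvRmv, List.filter_cons, hf]

theorem inner_fold (hmm : Bool) (k : String) (v : List (String × List String))
    (rem : List (String × List String)) (h : k ∉ rem.map Prod.fst) :
    v.foldl (pvStep1 hmm k) rem = rem ++ (if pvRmv hmm v = [] then [] else [(k, pvRmv hmm v)]) := by
  induction v with
  | nil => simp [pvRmv]
  | cons ab t ih =>
    simp only [List.foldl_cons, pvStep1]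
    by_cases hf : pvFail hmm ab.2
    · rw [if_pos hf, lookup_not_mem rem k h, Option.getD_none,
        dictSet_not_mem rem k ([] ++ [ab.1]) h]
      simp only [List.nil_append]
      rw [inner_aux hmm k t rem [ab.1] h]
      have : pvRmv hmm (ab :: t) = ab.1 :: pvRmv hmm t := by
        simp [pvRmv, List.filter_cons, hf]
      simp [this]
    · rw [if_neg hf, ih]
      have : pvRmv hmm (ab :: t) = pvRmv hmm t := by
        simp [pvRmv, List.filter_cons, hf]
      simp [this]

theorem mem_keys_R (hmm : Bool) (hd : List (String × List (String × List String))) (k : String)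
    (h : k ∈ (pvR hmm hd).map Prod.fst) : k ∈ hd.map Prod.fst := by
  simp only [pvR, List.mem_map, List.mem_filterMap] at h
  obtain ⟨p, ⟨kv, hkv, hif⟩, hfst⟩ := h
  split at hif
  · exact absurd hif (by simp)
  · simp only [Option.some.injEq] at hif
    subst hif
    exact List.mem_map.mpr ⟨kv, hkv, hfst⟩

theorem buildRemove_aux (hmm : Bool) (hd : List (String × List (String × List String))) :
    ∀ rem, (hd.map Prod.fst).Nodup → (∀ kv ∈ hd, kv.1 ∉ rem.map Prod.fst) →
    hd.foldl (fun rem kv => kv.2.foldl (pvStep1 hmm kv.1) rem) rem = rem ++ pvR hmm hd := by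
  induction hd with
  | nil => simp [pvR]
  | cons kv t ih =>
    intro rem hnd hdisj
    simp only [List.map_cons, List.nodup_cons] at hnd
    simp only [List.foldl_cons]
    rw [inner_fold hmm kv.1 kv.2 rem (hdisj kv (by simp))]
    rw [ih _ hnd.2 ?_]
    · by_cases hr : pvRmv hmm kv.2 = [] <;>
        simp [pvR, List.filterMap_cons, hr, List.append_assoc]
    · intro kv' hkv'
      have h1 : kv'.1 ∉ rem.map Prod.fst := hdisj kv' (List.mem_cons_of_mem _ hkv')
      have h2 : kv'.1 ≠ kv.1 := by
        intro he
        exact hnd.1 (he ▸ List.mem_map.mpr ⟨kv', hkv', rfl⟩)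
      by_cases hr : pvRmv hmm kv.2 = [] <;> simp [hr, h1, h2]

theorem buildRemove_eq (hmm : Bool) (hd : List (String × List (String × List String)))
    (hnd : (hd.map Prod.fst).Nodup) : pvBuildRemove hmm hd = pvR hmm hd := by
  have := buildRemove_aux hmm hd [] hnd (by simp)
  simpa [pvBuildRemove] using this

def pvDelAll (xs : List String) (v : List (String × List String)) : List (String × List String) :=
  xs.foldl pvDictDel v

def pvPhase2' (remove : List (String × List String)) (h : List (String × List (String × List String))) : List (String × List (String × List String)) :=
  remove.foldl (fun h kx => pvDictModify h kx.1 (fun inner => pvDelAll kx.2 inner)) h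

theorem dictModify_dictModify (h : List (String × List (String × List String))) (k : String)
    (f g : List (String × List String) → List (String × List String)) :
    pvDictModify (pvDictModify h k f) k g = pvDictModify h k (fun v => g (f v)) := by
  induction h with
  | nil => rfl
  | cons p t ih =>
    obtain ⟨a, w⟩ := p
    by_cases ha : a = k
    · subst ha; simp [pvDictModify]
    · simp [pvDictModify, ha, ih]

theorem dictModify_id (h : List (String × List (String × List String))) (k : String) :
    pvDictModify h k (fun v => v) = h := by
  induction h with
  | nil => rfl
  | cons p t ih =>
    obtain ⟨a, w⟩ := p
    by_cases ha : a = k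
    · subst ha; simp [pvDictModify]
    · simp [pvDictModify, ha, ih]

theorem foldl_del_modify (k : String) (xs : List String) :
    ∀ h : List (String × List (String × List String)),
    xs.foldl (fun h x => pvDictModify h k (fun inner => pvDictDel inner x)) h =
      pvDictModify h k (fun inner => pvDelAll xs inner) := by
  induction xs with
  | nil =>
    intro h
    simp only [List.foldl_nil, pvDelAll, List.foldl_nil]
    exact (dictModify_id h k).symm
  | cons x t ih =>
    intro h
    simp only [List.foldl_cons]
    rw [ih, dictModify_dictModify]
    rfl

theorem phase2_eq (remove : List (String × List String)) (h : List (String × List (String × List String))) :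
    pvPhase2 remove h = pvPhase2' remove h := by
  induction remove generalizing h with
  | nil => rfl
  | cons kx t ih =>
    simp only [pvPhase2, pvPhase2', List.foldl_cons] at *
    rw [foldl_del_modify kx.1 kx.2 h]
    exact ih _

theorem phase2'_skip (rl : List (String × List String)) (k : String) (w : List (String × List String))
    (h : List (String × List (String × List String))) (hk : k ∉ rl.map Prod.fst) :
    pvPhase2' rl ((k, w) :: h) = (k, w) :: pvPhase2' rl h := by
  induction rl generalizing h with
  | nil => rfl
  | cons kx t ih =>
    simp only [List.map_cons, List.mem_cons, not_or] at hk
    simp only [pvPhase2', List.foldl_cons]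
    have : pvDictModify ((k, w) :: h) kx.1 (fun inner => pvDelAll kx.2 inner) =
        (k, w) :: pvDictModify h kx.1 (fun inner => pvDelAll kx.2 inner) := by
      simp [pvDictModify, hk.1]
    rw [this]
    exact ih _ hk.2

theorem phase2'_map (hmm : Bool) (hd : List (String × List (String × List String)))
    (hnd : (hd.map Prod.fst).Nodup) :
    pvPhase2' (pvR hmm hd) hd = hd.map (fun kv => (kv.1, pvDelAll (pvRmv hmm kv.2) kv.2)) := by
  induction hd with
  | nil => rfl
  | cons kv t ih =>
    obtain ⟨k, v⟩ := kv
    simp only [List.map_cons, List.nodup_cons] at hnd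
    have hkR : k ∉ (pvR hmm t).map Prod.fst := fun hmem => hnd.1 (mem_keys_R hmm t k hmem)
    by_cases hr : pvRmv hmm v = []
    · have hRc : pvR hmm ((k, v) :: t) = pvR hmm t := by
        simp [pvR, List.filterMap_cons, hr]
      rw [hRc, phase2'_skip _ _ _ _ hkR, ih hnd.2]
      simp [hr, pvDelAll]
    · have hRc : pvR hmm ((k, v) :: t) = (k, pvRmv hmm v) :: pvR hmm t := by
        simp [pvR, List.filterMap_cons, hr]
      rw [hRc]
      simp only [pvPhase2', List.foldl_cons]
      have : pvDictModify ((k, v) :: t) k (fun inner => pvDelAll (pvRmv hmm v) inner) =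
          (k, pvDelAll (pvRmv hmm v) v) :: t := by
        simp [pvDictModify]
      rw [this]
      have := phase2'_skip (pvR hmm t) k (pvDelAll (pvRmv hmm v) v) t hkR
      simp only [pvPhase2'] at this ih ⊢
      rw [this, ih hnd.2]
      simp

theorem delAll_cons_skip (xs : List String) (a : String) (b : List String)
    (t : List (String × List String)) (h : ∀ x ∈ xs, x ≠ a) :
    pvDelAll xs ((a, b) :: t) = (a, b) :: pvDelAll xs t := by
  induction xs generalizing t with
  | nil => rfl
  | cons x xt ih =>
    simp only [List.mem_cons, forall_eq_or_imp] at h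
    simp only [pvDelAll, List.foldl_cons]
    have : pvDictDel ((a, b) :: t) x = (a, b) :: pvDictDel t x := by
      simp [pvDictDel, Ne.symm h.1]
    rw [this]
    exact ih _ h.2

theorem mem_rmv_keys (hmm : Bool) (v : List (String × List String)) (x : String)
    (h : x ∈ pvRmv hmm v) : x ∈ v.map Prod.fst := by
  simp only [pvRmv, List.mem_map, List.mem_filter] at h
  obtain ⟨ab, ⟨hab, -⟩, rfl⟩ := h
  exact List.mem_map.mpr ⟨ab, hab, rfl⟩

theorem delAll_filter (hmm : Bool) (v : List (String × List String))
    (hnd : (v.map Prod.fst).Nodup) :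
    pvDelAll (pvRmv hmm v) v = v.filter (fun ab => ! pvFail hmm ab.2) := by
  induction v with
  | nil => rfl
  | cons ab t ih =>
    obtain ⟨a, b⟩ := ab
    simp only [List.map_cons, List.nodup_cons] at hnd
    by_cases hf : pvFail hmm b
    · have hrc : pvRmv hmm ((a, b) :: t) = a :: pvRmv hmm t := by
        simp [pvRmv, List.filter_cons, hf]
      rw [hrc]
      have hdel : pvDictDel ((a, b) :: t) a = t := by simp [pvDictDel]
      simp only [pvDelAll, List.foldl_cons, hdel]
      rw [show (pvRmv hmm t).foldl pvDictDel t = pvDelAll (pvRmv hmm t) t from rfl,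
        ih hnd.2]
      simp [List.filter_cons, hf]
    · have hrc : pvRmv hmm ((a, b) :: t) = pvRmv hmm t := by
        simp [pvRmv, List.filter_cons, hf]
      rw [hrc, delAll_cons_skip _ _ _ _ ?_, ih hnd.2]
      · simp [List.filter_cons, hf]
      · intro x hx he
        exact hnd.1 (he ▸ mem_rmv_keys hmm t x hx)

theorem phase3_skip (rl : List (String × List String)) (k : String) (w : List (String × List String))
    (h : List (String × List (String × List String))) (hk : k ∉ rl.map Prod.fst) :
    pvPhase3 rl ((k, w) :: h) = (k, w) :: pvPhase3 rl h := by
  induction rl generalizing h with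
  | nil => rfl
  | cons kx t ih =>
    simp only [List.map_cons, List.mem_cons, not_or] at hk
    simp only [pvPhase3, List.foldl_cons]
    have hb : (kx.1 == k) = false := by
      simp only [beq_eq_false_iff_ne, ne_eq]
      exact fun he => hk.1 he.symm
    have hlk : List.lookup kx.1 ((k, w) :: h) = List.lookup kx.1 h := by
      simp [List.lookup, hb]
    have hdel : pvDictDel ((k, w) :: h) kx.1 = (k, w) :: pvDictDel h kx.1 := by
      simp [pvDictDel, hk.1]
    rw [hlk]
    by_cases hc : List.lookup kx.1 h = some []
    · simp only [hc, if_pos rfl, hdel]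
      exact ih _ hk.2
    · simp only [if_neg hc]
      exact ih _ hk.2

theorem phase3_main (hmm : Bool) (hd : List (String × List (String × List String)))
    (hnd : (hd.map Prod.fst).Nodup) (hne : ∀ kv ∈ hd, kv.2 ≠ []) :
    pvPhase3 (pvR hmm hd) (hd.map (fun kv => (kv.1, kv.2.filter (fun ab => ! pvFail hmm ab.2)))) = clear_dict_alt hd hmm := by
  have halt : clear_dict_alt hd hmm = hd.filterMap (fun kv =>
      if (kv.2.filter (fun ab => ! pvFail hmm ab.2)).isEmpty then none
      else some (kv.1, kv.2.filter (fun ab => ! pvFail hmm ab.2))) := by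
    simp only [clear_dict_alt, pvHasMat_eq_not_fail]
  rw [halt]
  clear halt
  induction hd with
  | nil => rfl
  | cons kv t ih =>
    obtain ⟨k, v⟩ := kv
    simp only [List.map_cons, List.nodup_cons] at hnd
    have hvne : v ≠ [] := hne (k, v) (by simp)
    have hnet : ∀ kv ∈ t, kv.2 ≠ [] := fun kv h => hne kv (List.mem_cons_of_mem _ h)
    have hkR : k ∉ (pvR hmm t).map Prod.fst := fun hmem => hnd.1 (mem_keys_R hmm t k hmem)
    simp only [List.map_cons, List.filterMap_cons]
    by_cases hr : pvRmv hmm v = []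
    · have hRc : pvR hmm ((k, v) :: t) = pvR hmm t := by
        simp [pvR, List.filterMap_cons, hr]
      have hall : ∀ ab ∈ v, pvFail hmm ab.2 = false := by
        intro ab hab
        by_contra hne'
        have : ab.1 ∈ pvRmv hmm v := by
          simp only [pvRmv, List.mem_map, List.mem_filter]
          exact ⟨ab, ⟨hab, by simpa using hne'⟩, rfl⟩
        simp [hr] at this
      have hfeq : v.filter (fun ab => ! pvFail hmm ab.2) = v := by
        apply List.filter_eq_self.mpr
        intro ab hab
        simp [hall ab hab]
      have hcond : (v.filter (fun ab => ! pvFail hmm ab.2)).isEmpty = false := by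
        rw [hfeq]; simp [hvne]
      rw [hRc, phase3_skip _ _ _ _ hkR, ih hnd.2 hnet, hcond]
      simp [hfeq]
    · have hRc : pvR hmm ((k, v) :: t) = (k, pvRmv hmm v) :: pvR hmm t := by
        simp [pvR, List.filterMap_cons, hr]
      rw [hRc]
      simp only [pvPhase3, List.foldl_cons]
      have hlk : List.lookup k ((k, v.filter (fun ab => ! pvFail hmm ab.2)) ::
          t.map (fun kv => (kv.1, kv.2.filter (fun ab => ! pvFail hmm ab.2)))) =
          some (v.filter (fun ab => ! pvFail hmm ab.2)) := by
        simp [List.lookup]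
      rw [hlk]
      by_cases hfv : v.filter (fun ab => ! pvFail hmm ab.2) = []
      · have hdel : pvDictDel ((k, v.filter (fun ab => ! pvFail hmm ab.2)) ::
            t.map (fun kv => (kv.1, kv.2.filter (fun ab => ! pvFail hmm ab.2)))) k =
            t.map (fun kv => (kv.1, kv.2.filter (fun ab => ! pvFail hmm ab.2))) := by
          simp [pvDictDel]
        rw [if_pos (by rw [hfv]), hdel]
        have hcond : (v.filter (fun ab => ! pvFail hmm ab.2)).isEmpty = true := by
          simp [hfv]
        rw [hcond]
        simp only [pvPhase3] at ih
        rw [ih hnd.2 hnet]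
        simp
      · have hcond : (v.filter (fun ab => ! pvFail hmm ab.2)).isEmpty = false := by
          simp [hfv]
        rw [if_neg (by simpa using hfv), hcond]
        have hskip := phase3_skip (pvR hmm t) k (v.filter (fun ab => ! pvFail hmm ab.2))
          (t.map (fun kv => (kv.1, kv.2.filter (fun ab => ! pvFail hmm ab.2)))) hkR
        simp only [pvPhase3] at hskip ih ⊢
        rw [hskip, ih hnd.2 hnet]
        simp

-- ===== VERDICT (by name: the statement is the Claim_ definition above) =====
theorem clear_dict_spec : Claim_equal_clear_dict := by
  intro hdict hmm _ hpre
  obtain ⟨hnd, hinner, -, hne⟩ := hpre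
  unfold Spec_clear_dict clear_dict
  rw [buildRemove_eq hmm hdict hnd, phase2_eq, phase2'_map hmm hdict hnd]
  have hmapeq : hdict.map (fun kv => (kv.1, pvDelAll (pvRmv hmm kv.2) kv.2)) =
      hdict.map (fun kv => (kv.1, kv.2.filter (fun ab => ! pvFail hmm ab.2))) := by
    apply List.map_congr_left
    intro kv hkv
    rw [delAll_filter hmm kv.2 (hinner kv hkv)]
  rw [hmapeq, phase3_main hmm hdict hnd hne]
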